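-- pv_equiv track=rewrite | github.com/sabnzbd/sabnzbd | sabnzbd/filesystem.py | replace_win_devices
-- ===== SOURCE A (Python) =====
-- _DEVICES = (
--     "con",
--     "prn",
--     "aux",
--     "nul",
--     "com1",
--     "com2",
--     "com3",
--     "com4",
--     "com5",
--     "com6",
--     "com7",
--     "com8",
--     "com9",
--     "lpt1",
--     "lpt2",
--     "lpt3",
--     "lpt4",
--     "lpt5",
--     "lpt6",
--     "lpt7",
--     "lpt8",
--     "lpt9",
-- )
--
-- def replace_win_devices(name: str) -> str:
--     """Remove reserved Windows device names from a name.
--     aux.txt ==> _aux.txt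
--     txt.aux ==> txt.aux
--     """
--     if name:
--         lname = name.lower()
--         for dev in _DEVICES:
--             if lname == dev or lname.startswith(dev + "."):
--                 name = "_" + name
--                 break
--
--         # Remove special NTFS filename
--         if lname.startswith("$mft"):
--             name = name.replace("$", "S", 1)
--
--     return name
-- ===== SOURCE B (Python) =====
-- def _reserved(stem: str) -> bool:
--     """Closed-form rule for the reserved device names: the four fixed 3-letter
--     names, or com/lpt followed by a single digit 1-9."""
--     if len(stem) == 3:
--         return stem in ("con", "prn", "aux", "nul")
--     if len(stem) == 4 and stem[:3] in ("com", "lpt"):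
--         return "1" <= stem[3] <= "9"
--     return False
--
--
-- def replace_win_devices(name: str) -> str:
--     """Remove reserved Windows device names from a name.
--     aux.txt ==> _aux.txt
--     txt.aux ==> txt.aux
--     """
--     if not name:
--         return name
--     # single char-level pass: lowercase stem before the first dot
--     stem = ""
--     for ch in name:
--         if ch == ".":
--             break
--         stem += ch.lower()
--     out = "_" + name if _reserved(stem) else name
--     if name[:4].lower() == "$mft":
--         out = out.replace("$", "S", 1)
--     return out
-- ===== Notes on version B (the rewrite author's own statement) =====
-- stated objective: simpler
-- what changed: Replaces A's scan over the 22-name device table (equality or dot-prefix test per device, with break) by a single char-level pass that accumulates the lowercased stem before the first dot, then classifies it with a closed-form rule (the four 3-letter names, or com/lpt followed by a digit 1-9) with no device table at all.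
import Mathlib
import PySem

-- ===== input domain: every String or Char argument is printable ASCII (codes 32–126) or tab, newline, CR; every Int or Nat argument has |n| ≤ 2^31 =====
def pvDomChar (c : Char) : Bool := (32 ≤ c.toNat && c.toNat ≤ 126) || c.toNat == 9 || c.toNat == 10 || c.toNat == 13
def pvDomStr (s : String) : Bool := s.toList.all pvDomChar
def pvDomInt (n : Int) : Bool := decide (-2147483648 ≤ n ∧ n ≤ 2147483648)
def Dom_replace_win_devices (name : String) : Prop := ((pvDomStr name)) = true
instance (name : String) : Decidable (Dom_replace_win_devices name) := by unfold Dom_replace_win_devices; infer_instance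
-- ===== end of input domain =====

-- B replaces A's scan over a 22-name device table by one char-level pass that builds the
-- lowercased stem before the first dot, classified by a closed-form length/prefix/digit rule
-- (con/prn/aux/nul, or com/lpt plus a digit 1-9) — no device table at all (objective: simpler).

-- ===== PORT A =====
def pvDevices : List String :=
  ["con", "prn", "aux", "nul",
   "com1", "com2", "com3", "com4", "com5", "com6", "com7", "com8", "com9",
   "lpt1", "lpt2", "lpt3", "lpt4", "lpt5", "lpt6", "lpt7", "lpt8", "lpt9"]

-- hand port of name.replace("$", "S", 1): single-char old/new, count 1 — exact: replaces the first '$' if any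
def pvReplaceDollarOnce : List Char → List Char
  | [] => []
  | c :: cs => if c = '$' then 'S' :: cs else c :: pvReplaceDollarOnce cs

-- the 'for dev in _DEVICES: … break' loop
def replace_win_devices_go (lname name : String) : List String → String
  | [] => name
  | d :: rest =>
      if lname == d || PySem.Str.startswith lname (d ++ ".") then "_" ++ name
      else replace_win_devices_go lname name rest

def replace_win_devices (name : String) : String :=
  if name == "" then name
  else
    let lname := PySem.Str.lower name
    let name1 := replace_win_devices_go lname name pvDevices
    if PySem.Str.startswith lname "$mft" then String.ofList (pvReplaceDollarOnce name1.toList)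
    else name1

-- ===== PORT B =====
-- the 'for ch in name: if ch == ".": break; stem += ch.lower()' loop
def altStem : List Char → List Char
  | [] => []
  | c :: cs => if c = '.' then [] else PySem.Chars.lowerChar c :: altStem cs

def pvNames3 : List (List Char) :=
  [['c','o','n'], ['p','r','n'], ['a','u','x'], ['n','u','l']]

def pvPrefixes4 : List (List Char) :=
  [['c','o','m'], ['l','p','t']]

-- port of _reserved; stem[:3] is take 3 (nonnegative slice), stem[3] is getD 3 (exact: length = 4 here)
def altReserved (stem : List Char) : Bool :=
  if stem.length = 3 then pvNames3.contains stem
  else if stem.length = 4 && pvPrefixes4.contains (stem.take 3) then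
    decide ('1' ≤ stem.getD 3 ' ') && decide (stem.getD 3 ' ' ≤ '9')
  else false

def replace_win_devices_alt (name : String) : String :=
  if name == "" then name
  else
    let stem := altStem name.toList
    let out := if altReserved stem then "_" ++ name else name
    -- name[:4].lower() == "$mft" : nonnegative slice = take 4
    if PySem.Chars.lower (name.toList.take 4) == "$mft".toList
    then String.ofList (pvReplaceDollarOnce out.toList)
    else out

-- ===== PRECONDITION & SPEC =====
def Spec_replace_win_devices (name : String) (out : String) : Prop := out = replace_win_devices_alt name
instance (name : String) (out : String) : Decidable (Spec_replace_win_devices name out) := by unfold Spec_replace_win_devices; infer_instance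

-- ===== CLAIM (what is proved, stated in full; the proofs are below) =====
def Claim_equal_replace_win_devices : Prop := ∀ (name : String), Dom_replace_win_devices name → Spec_replace_win_devices name (replace_win_devices name)

-- ===== LEMMAS AND PROOFS =====

-- A's loop returns "_"++name iff some device matches
theorem go_eq_ite (lname name : String) (devs : List String) :
    replace_win_devices_go lname name devs =
      if devs.any (fun d => lname == d || PySem.Str.startswith lname (d ++ ".")) then "_" ++ name
      else name := by
  induction devs with
  | nil => simp [replace_win_devices_go]
  | cons d rest ih =>
      rw [replace_win_devices_go, List.any_cons, ih]
      cases h : (lname == d || PySem.Str.startswith lname (d ++ ".")) with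
      | true => simp
      | false => simp

-- lowering a character never creates or destroys a dot
theorem lowerChar_dot (c : Char) : (PySem.Chars.lowerChar c ≠ '.') = (c ≠ '.') := by
  by_cases hu : PySem.Chars.isupper c = true
  · simp only [PySem.Chars.isupper, Bool.and_eq_true, decide_eq_true_eq, Char.le_def] at hu
    have h1 : 65 ≤ c.toNat := by exact_mod_cast UInt32.le_iff_toNat_le.mp hu.1
    have h2 : c.toNat ≤ 90 := by exact_mod_cast UInt32.le_iff_toNat_le.mp hu.2
    have hc : c ≠ '.' := by
      intro h; subst h; exact absurd h1 (by decide)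
    have hl : PySem.Chars.lowerChar c ≠ '.' := by
      simp only [PySem.Chars.lowerChar]
      rw [if_pos (by simp [PySem.Chars.isupper, Char.le_def]; exact ⟨hu.1, hu.2⟩)]
      intro h
      have := congrArg Char.toNat h
      rw [Char.toNat_ofNat] at this
      have hv : (c.toNat + 32).isValidChar := by unfold Nat.isValidChar; omega
      rw [if_pos hv] at this
      have : ('.' : Char).toNat = 46 := by decide
      omega
    simp [hl, hc]
  · simp only [PySem.Chars.lowerChar, hu, Bool.false_eq_true, if_false]

-- B's stem loop is the lowercased take-until-dot of the name
theorem altStem_eq (s : List Char) :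
    altStem s = (s.map PySem.Chars.lowerChar).takeWhile (fun c => c != '.') := by
  induction s with
  | nil => simp [altStem]
  | cons c cs ih =>
      by_cases hc : c = '.'
      · subst hc
        have : (PySem.Chars.lowerChar '.' != '.') = false := by decide
        simp [altStem, this]
      · have hl : (PySem.Chars.lowerChar c != '.') = true := by
          simp only [bne_iff_ne, ne_eq]
          exact cast (lowerChar_dot c).symm hc
        simp [altStem, hc, hl, ih]

-- the core characterisation: matching a dot-free device ↔ the stem equals it
theorem stem_iff (s dl : List Char) (hd : '.' ∉ dl) :
    (s = dl ∨ (dl ++ ['.']) <+: s) ↔ s.takeWhile (fun c => c != '.') = dl := by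
  induction dl generalizing s with
  | nil =>
      cases s with
      | nil => simp
      | cons c t =>
          simp only [List.nil_append, List.takeWhile_cons]
          by_cases hc : c = '.'
          · subst hc; simp [List.cons_prefix_cons]
          · simp [hc, Ne.symm hc, List.cons_prefix_cons]
  | cons a dl' ih =>
      have ha : a ≠ '.' := fun h => hd (h ▸ List.mem_cons_self ..)
      have hd' : '.' ∉ dl' := fun h => hd (List.mem_cons_of_mem _ h)
      cases s with
      | nil => simp
      | cons c t =>
          rw [List.cons_append, List.takeWhile_cons]
          by_cases hc : c = '.'
          · subst hc
            have hb : (('.' : Char) != '.') = false := by decide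
            rw [hb]
            simp only [Bool.false_eq_true, if_false]
            constructor
            · rintro (h | h)
              · exact absurd (List.head_eq_of_cons_eq h).symm ha
              · exact absurd (List.cons_prefix_cons.1 h).1 ha
            · intro h; exact absurd h.symm (List.cons_ne_nil a dl')
          · have hb : (c != '.') = true := by simp [hc]
            rw [hb]
            simp only [if_true]
            constructor
            · rintro (h | h)
              · have h1 := List.head_eq_of_cons_eq h
                have h2 := List.tail_eq_of_cons_eq h
                subst h1; subst h2
                congr 1
                apply List.takeWhile_eq_self_iff.2
                intro x hx
                simp only [bne_iff_ne, ne_eq]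
                exact fun he => hd' (he ▸ hx)
              · rcases List.cons_prefix_cons.1 h with ⟨h1, h2⟩
                subst h1
                congr 1
                exact (ih t hd').1 (Or.inr h2)
            · intro h
              have h1 := List.head_eq_of_cons_eq h
              have h2 := List.tail_eq_of_cons_eq h
              subst h1
              rcases (ih t hd').2 h2 with h3 | h3
              · left; rw [h3]
              · right; exact List.cons_prefix_cons.2 ⟨rfl, h3⟩

theorem devices_dotfree : ∀ d ∈ pvDevices, '.' ∉ d.toList := by decide

-- a digit between '1' and '9' is one of the nine digit characters
theorem digit_cases (d : Char) (h1 : '1' ≤ d) (h2 : d ≤ '9') :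
    d ∈ ['1','2','3','4','5','6','7','8','9'] := by
  rw [Char.le_def] at h1 h2
  have e1 : 49 ≤ d.toNat := by exact_mod_cast UInt32.le_iff_toNat_le.mp h1
  have e2 : d.toNat ≤ 57 := by exact_mod_cast UInt32.le_iff_toNat_le.mp h2
  have hval : ∀ n, d.toNat = n → d = Char.ofNat n := by
    intro n hn; subst hn; exact (Char.ofNat_toNat d).symm
  have : d.toNat = 49 ∨ d.toNat = 50 ∨ d.toNat = 51 ∨ d.toNat = 52 ∨ d.toNat = 53 ∨
      d.toNat = 54 ∨ d.toNat = 55 ∨ d.toNat = 56 ∨ d.toNat = 57 := by omega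
  rcases this with h|h|h|h|h|h|h|h|h <;> rw [hval _ h] <;> decide

-- B's closed-form rule recognises exactly the 22 device names
theorem reserved_iff (t : List Char) :
    altReserved t = true ↔ t ∈ pvDevices.map String.toList := by
  constructor
  · intro h
    unfold altReserved at h
    split_ifs at h with h3 h4
    · rw [List.contains_iff_mem] at h
      fin_cases h <;> decide
    · rcases Bool.and_eq_true_iff.1 h4 with ⟨hlen, hpre⟩
      have hlen4 : t.length = 4 := by simpa using hlen
      rcases Bool.and_eq_true_iff.1 h with ⟨hd1, hd2⟩
      match t, hlen4 with
      | [a, b, c, d], _ =>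
        rw [List.contains_iff_mem] at hpre
        have hdig := digit_cases d (by simpa using hd1) (by simpa using hd2)
        fin_cases hpre <;> fin_cases hdig <;> decide
  · intro h
    fin_cases h <;> decide

-- A's device-loop condition equals B's rule applied to B's stem
theorem cond_equiv (name : String) :
    (pvDevices.any (fun d => PySem.Str.lower name == d ||
        PySem.Str.startswith (PySem.Str.lower name) (d ++ "."))) =
      altReserved (altStem name.toList) := by
  have hl : (PySem.Str.lower name).toList = name.toList.map PySem.Chars.lowerChar := by
    rw [PySem.Str.toList_lower]; rfl
  have hstem : altStem name.toList =
      (PySem.Str.lower name).toList.takeWhile (fun c => c != '.') := by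
    rw [altStem_eq, hl]
  rw [Bool.eq_iff_iff, List.any_eq_true, reserved_iff, hstem]
  set L := (PySem.Str.lower name) with hL
  constructor
  · rintro ⟨d, hdmem, hcond⟩
    have hiff := stem_iff L.toList d.toList (devices_dotfree d hdmem)
    have heq : L.toList.takeWhile (fun c => c != '.') = d.toList := by
      apply hiff.1
      rcases Bool.or_eq_true_iff.1 hcond with h | h
      · left; exact congrArg String.toList (beq_iff_eq.1 h)
      · right
        have := (PySem.Chars.startswith_iff _ _).1 (by simpa using h)
        simpa using this
    rw [heq]
    exact List.mem_map_of_mem hdmem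
  · intro hmem
    rcases List.mem_map.1 hmem with ⟨d, hdmem, hdl⟩
    refine ⟨d, hdmem, ?_⟩
    have hiff := stem_iff L.toList d.toList (devices_dotfree d hdmem)
    rcases hiff.2 hdl.symm with h | h
    · apply Bool.or_eq_true_iff.2; left
      exact (beq_iff_eq).2 (String.ext (by simpa using h))
    · apply Bool.or_eq_true_iff.2; right
      rw [PySem.Str.startswith_eq]
      apply (PySem.Chars.startswith_iff _ _).2
      simpa using h

-- A's startswith("$mft") test equals B's lowered-take-4 comparison
theorem mft_equiv (name : String) :
    PySem.Str.startswith (PySem.Str.lower name) "$mft" =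
      (PySem.Chars.lower (name.toList.take 4) == "$mft".toList) := by
  have hl : (PySem.Str.lower name).toList = name.toList.map PySem.Chars.lowerChar := by
    rw [PySem.Str.toList_lower]; rfl
  have hlow : PySem.Chars.lower (name.toList.take 4) =
      (PySem.Str.lower name).toList.take 4 := by
    rw [hl]; exact List.map_take
  rw [Bool.eq_iff_iff, PySem.Str.startswith_eq, PySem.Chars.startswith_iff, hlow,
    beq_iff_eq, List.prefix_iff_eq_take]
  have h4 : ("$mft".toList).length = 4 := by decide
  rw [h4]
  exact ⟨fun h => h.symm, fun h => h.symm⟩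

-- ===== VERDICT (by name: the statement is the Claim_ definition above) =====
theorem replace_win_devices_spec : Claim_equal_replace_win_devices := by
  intro name _
  unfold Spec_replace_win_devices replace_win_devices replace_win_devices_alt
  by_cases hempty : name == ""
  · simp [hempty]
  · simp only [hempty]
    rw [go_eq_ite, cond_equiv, mft_equiv]
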